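-- pv_equiv track=rewrite | github.com/priegojorgeluis7-a11y/SAO | backend/app/api/v1/projects.py | _normalize_location_entries
-- ===== SOURCE A (Python) =====
-- def _normalize_location_entries(location_payload) -> list[dict]:
--     normalized: list[dict] = []
--     seen_locations: set[tuple[str, str]] = set()
--
--     for item in location_payload:
--         if isinstance(item, dict):
--             estado = str(item.get("estado") or "").strip()
--             municipio = str(item.get("municipio") or "").strip()
--         else:
--             estado = str(getattr(item, "estado", "") or "").strip()
--             municipio = str(getattr(item, "municipio", "") or "").strip()
--         if not estado or not municipio:
--             continue
--
--         key = (estado, municipio)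
--         if key in seen_locations:
--             continue
--
--         normalized.append({"estado": estado, "municipio": municipio})
--         seen_locations.add(key)
--
--     normalized.sort(key=lambda item: (item["estado"], item["municipio"]))
--     return normalized
-- ===== SOURCE B (Python) =====
-- def _normalize_location_entries(location_payload) -> list[dict]:
--     cleaned: list[tuple[str, str]] = []
--     for item in location_payload:
--         estado = str(item.get("estado") or "").strip()
--         municipio = str(item.get("municipio") or "").strip()
--         if estado and municipio:
--             cleaned.append((estado, municipio))
--
--     cleaned.sort()
--
--     result: list[dict] = []
--     prev = None
--     for key in cleaned:
--         if key != prev: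
--             result.append({"estado": key[0], "municipio": key[1]})
--             prev = key
--     return result
-- ===== Notes on version B (the rewrite author's own statement) =====
-- stated objective: simpler
-- what changed: B replaces A's set-membership dedup-then-sort with clean-all, sort the full cleaned key list, and a single adjacency pass that keeps an entry only when its key differs from the previously kept one (no set/dict is maintained).
import Mathlib
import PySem

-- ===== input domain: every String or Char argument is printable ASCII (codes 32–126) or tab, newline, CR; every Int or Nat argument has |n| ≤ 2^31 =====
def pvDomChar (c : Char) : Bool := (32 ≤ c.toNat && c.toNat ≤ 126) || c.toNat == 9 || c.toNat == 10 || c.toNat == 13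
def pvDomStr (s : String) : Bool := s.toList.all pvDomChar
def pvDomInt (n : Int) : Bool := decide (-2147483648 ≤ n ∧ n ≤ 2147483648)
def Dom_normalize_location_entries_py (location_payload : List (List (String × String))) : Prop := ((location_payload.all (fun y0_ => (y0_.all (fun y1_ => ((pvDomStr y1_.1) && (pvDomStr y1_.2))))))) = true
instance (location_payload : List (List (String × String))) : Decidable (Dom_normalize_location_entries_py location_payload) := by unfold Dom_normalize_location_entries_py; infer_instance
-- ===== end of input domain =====

-- B normalizes all entries first, sorts the whole cleaned list, and deduplicates by a single
-- adjacency pass over the sorted list instead of A's seen-set dedup followed by a sort (objective: simpler).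


-- shared helpers (the same extraction lines appear verbatim in both Pythons):
-- str(item.get(k) or "") — first-match association-list lookup, missing key (None) collapses to "";
-- a present-but-empty value is falsy and also yields "", so get-with-default "" is exact.
def pvGetS (item : List (String × String)) (k : String) : String := (item.lookup k).getD ""

-- the dict literal {"estado": e, "municipio": m} in insertion order
def pvEntry (e m : String) : List (String × String) := [("estado", e), ("municipio", m)]

-- A's sort key lambda item: (item["estado"], item["municipio"]) — Python tuple comparison is
-- lexicographic, hence toLex; every entry in `normalized` carries both keys, so the first-match
-- lookup with default "" equals Python's subscript on the lists this key is applied to.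
def pvKeyA (it : List (String × String)) : Lex (String × String) :=
  toLex (pvGetS it "estado", pvGetS it "municipio")

-- ===== PORT A =====
def normalize_location_entries_py (location_payload : List (List (String × String))) : List (List (String × String)) :=
  -- items are dicts under the type convention, so only the isinstance(item, dict) branch is reachable
  let st := location_payload.foldl
    (fun (acc : List (List (String × String)) × PySem.Set (String × String)) item =>
      let estado := PySem.Str.strip (pvGetS item "estado")
      let municipio := PySem.Str.strip (pvGetS item "municipio")
      if estado = "" ∨ municipio = "" then acc
      else if PySem.Set.contains acc.2 (estado, municipio) then acc
      else (acc.1 ++ [pvEntry estado municipio], PySem.Set.add acc.2 (estado, municipio)))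
    ([], PySem.Set.empty)
  PySem.List.sorted st.1 pvKeyA

-- ===== PORT B =====
def normalize_location_entries_py_alt (location_payload : List (List (String × String))) : List (List (String × String)) :=
  let cleaned := location_payload.foldl
    (fun (acc : List (String × String)) item =>
      let estado := PySem.Str.strip (pvGetS item "estado")
      let municipio := PySem.Str.strip (pvGetS item "municipio")
      if estado ≠ "" ∧ municipio ≠ "" then acc ++ [(estado, municipio)] else acc) []
  -- cleaned.sort(): plain tuple sort = lexicographic
  let sortedC := PySem.List.sorted cleaned (fun k => toLex k)
  (sortedC.foldl
    (fun (acc : List (List (String × String)) × Option (String × String)) k =>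
      if acc.2 ≠ some k then (acc.1 ++ [pvEntry k.1 k.2], some k) else acc)
    ([], none)).1

-- ===== PRECONDITION & SPEC =====
def Spec_normalize_location_entries_py (location_payload : List (List (String × String))) (out : List (List (String × String))) : Prop := out = normalize_location_entries_py_alt location_payload
instance (location_payload : List (List (String × String))) (out : List (List (String × String))) : Decidable (Spec_normalize_location_entries_py location_payload out) := by unfold Spec_normalize_location_entries_py; infer_instance

-- ===== CLAIM (what is proved, stated in full; the proofs are below) =====
def Claim_equal_normalize_location_entries_py : Prop := ∀ (location_payload : List (List (String × String))), Dom_normalize_location_entries_py location_payload → Spec_normalize_location_entries_py location_payload (normalize_location_entries_py location_payload)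

-- ===== LEMMAS AND PROOFS =====

-- the cleaned key stream both loops extract from the payload
def pvClean (payload : List (List (String × String))) : List (String × String) :=
  payload.filterMap (fun item =>
    if PySem.Str.strip (pvGetS item "estado") = "" ∨ PySem.Str.strip (pvGetS item "municipio") = "" then none
    else some (PySem.Str.strip (pvGetS item "estado"), PySem.Str.strip (pvGetS item "municipio")))

-- first occurrences of the keys not already in s (A's seen-set filter, as a pure recursion)
def pvFirst (ks : List (String × String)) (s : PySem.Set (String × String)) : List (String × String) :=
  match ks with
  | [] => []
  | k :: t => if PySem.Set.contains s k then pvFirst t s else k :: pvFirst t (PySem.Set.add s k)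

-- B's adjacency dedup, as a pure recursion on the sorted key list
def pvAdj (p : Option (String × String)) (l : List (String × String)) : List (String × String) :=
  match l with
  | [] => []
  | k :: t => if p ≠ some k then k :: pvAdj (some k) t else pvAdj p t

theorem pvKeyA_entry (e m : String) : pvKeyA (pvEntry e m) = toLex (e, m) := rfl

theorem pvA_fold (payload : List (List (String × String))) :
    ∀ (ns : List (List (String × String))) (s : PySem.Set (String × String)),
    (payload.foldl
      (fun (acc : List (List (String × String)) × PySem.Set (String × String)) item =>
        let estado := PySem.Str.strip (pvGetS item "estado")
        let municipio := PySem.Str.strip (pvGetS item "municipio")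
        if estado = "" ∨ municipio = "" then acc
        else if PySem.Set.contains acc.2 (estado, municipio) then acc
        else (acc.1 ++ [pvEntry estado municipio], PySem.Set.add acc.2 (estado, municipio)))
      (ns, s)).1 = ns ++ (pvFirst (pvClean payload) s).map (fun k => pvEntry k.1 k.2) := by
  induction payload with
  | nil => intro ns s; simp [pvClean, pvFirst]
  | cons item rest ih =>
    intro ns s
    simp only [List.foldl_cons, pvClean, List.filterMap_cons]
    by_cases h1 : PySem.Str.strip (pvGetS item "estado") = "" ∨ PySem.Str.strip (pvGetS item "municipio") = ""
    · simpa [h1, pvClean] using ih ns s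
    · by_cases h2 : (PySem.Str.strip (pvGetS item "estado"), PySem.Str.strip (pvGetS item "municipio")) ∈ s
      · simpa [h1, h2, pvFirst, pvClean, PySem.Set.contains_iff] using ih ns s
      · simpa [h1, h2, pvFirst, pvClean, PySem.Set.contains_iff] using
          ih (ns ++ [pvEntry (PySem.Str.strip (pvGetS item "estado")) (PySem.Str.strip (pvGetS item "municipio"))])
             (PySem.Set.add s (PySem.Str.strip (pvGetS item "estado"), PySem.Str.strip (pvGetS item "municipio")))

theorem pvB_fold1 (payload : List (List (String × String))) :
    ∀ (acc : List (String × String)),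
    payload.foldl
      (fun (acc : List (String × String)) item =>
        let estado := PySem.Str.strip (pvGetS item "estado")
        let municipio := PySem.Str.strip (pvGetS item "municipio")
        if estado ≠ "" ∧ municipio ≠ "" then acc ++ [(estado, municipio)] else acc) acc
    = acc ++ pvClean payload := by
  induction payload with
  | nil => intro acc; simp [pvClean]
  | cons item rest ih =>
    intro acc
    simp only [List.foldl_cons, pvClean, List.filterMap_cons]
    by_cases h1 : PySem.Str.strip (pvGetS item "estado") = "" ∨ PySem.Str.strip (pvGetS item "municipio") = ""
    · have h1' : ¬ (PySem.Str.strip (pvGetS item "estado") ≠ "" ∧ PySem.Str.strip (pvGetS item "municipio") ≠ "") := by tauto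
      simpa [h1, h1', pvClean] using ih acc
    · have h1' : PySem.Str.strip (pvGetS item "estado") ≠ "" ∧ PySem.Str.strip (pvGetS item "municipio") ≠ "" := by tauto
      simpa [h1, h1', pvClean] using
        ih (acc ++ [(PySem.Str.strip (pvGetS item "estado"), PySem.Str.strip (pvGetS item "municipio"))])

theorem pvB_fold2 (l : List (String × String)) :
    ∀ (ns : List (List (String × String))) (p : Option (String × String)),
    (l.foldl
      (fun (acc : List (List (String × String)) × Option (String × String)) k =>
        if acc.2 ≠ some k then (acc.1 ++ [pvEntry k.1 k.2], some k) else acc) (ns, p)).1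
    = ns ++ (pvAdj p l).map (fun k => pvEntry k.1 k.2) := by
  induction l with
  | nil => intro ns p; simp [pvAdj]
  | cons k t ih =>
    intro ns p
    by_cases h : p ≠ some k
    · simpa [h, pvAdj] using ih (ns ++ [pvEntry k.1 k.2]) (some k)
    · have hp : p = some k := by tauto
      subst hp
      simpa [pvAdj] using ih ns (some k)

theorem pvAdj_some_spec (l : List (String × String)) :
    ∀ (v : String × String),
    l.Pairwise (fun a b => toLex a ≤ toLex b) →
    (∀ x ∈ l, toLex v ≤ toLex x) →
    (pvAdj (some v) l).Pairwise (fun a b => toLex a < toLex b)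
    ∧ (∀ x, x ∈ pvAdj (some v) l ↔ x ∈ l ∧ x ≠ v) := by
  induction l with
  | nil => intro v _ _; simp [pvAdj]
  | cons k t ih =>
    intro v hp hv
    have hpk : ∀ x ∈ t, toLex k ≤ toLex x := (List.pairwise_cons.mp hp).1
    have hpt : t.Pairwise (fun a b => toLex a ≤ toLex b) := (List.pairwise_cons.mp hp).2
    by_cases hvk : v = k
    · subst hvk
      have hshape : pvAdj (some v) (v :: t) = pvAdj (some v) t := by
        simp only [pvAdj]
        rw [if_neg (by simp)]
      have ht := ih v hpt hpk
      rw [hshape]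
      refine ⟨ht.1, fun x => ?_⟩
      rw [ht.2 x, List.mem_cons]
      constructor
      · rintro ⟨hx, hne⟩; exact ⟨Or.inr hx, hne⟩
      · rintro ⟨(rfl | hx), hne⟩
        · exact absurd rfl hne
        · exact ⟨hx, hne⟩
    · have hvk' : toLex v < toLex k := by
        have hle := hv k (List.mem_cons_self ..)
        refine lt_of_le_of_ne hle (fun e => hvk ?_)
        exact toLex.injective e
      have hkx : ∀ x ∈ t, toLex v < toLex x := fun x hx => lt_of_lt_of_le hvk' (hpk x hx)
      have ht := ih k hpt hpk
      have hcond : (some v ≠ some k) := by simpa using hvk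
      have hshape : pvAdj (some v) (k :: t) = k :: pvAdj (some k) t := by
        simp only [pvAdj]
        rw [if_pos hcond]
      rw [hshape]
      constructor
      · rw [List.pairwise_cons]
        refine ⟨fun b hb => ?_, ht.1⟩
        have hb' := (ht.2 b).mp hb
        refine lt_of_le_of_ne (hpk b hb'.1) (fun e => hb'.2 ?_)
        exact (toLex.injective e).symm
      · intro x
        rw [List.mem_cons, ht.2 x, List.mem_cons]
        constructor
        · rintro (rfl | ⟨hx, hne⟩)
          · refine ⟨Or.inl rfl, fun e => ?_⟩
            subst e
            exact lt_irrefl _ hvk'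
          · refine ⟨Or.inr hx, fun e => ?_⟩
            subst e
            exact lt_irrefl _ (hkx x hx)
        · rintro ⟨(rfl | hx), hne⟩
          · exact Or.inl rfl
          · by_cases hxk : x = k
            · exact Or.inl hxk
            · exact Or.inr ⟨hx, hxk⟩

theorem pvAdj_none_spec (l : List (String × String))
    (hp : l.Pairwise (fun a b => toLex a ≤ toLex b)) :
    (pvAdj none l).Pairwise (fun a b => toLex a < toLex b)
    ∧ (∀ x, x ∈ pvAdj none l ↔ x ∈ l) := by
  cases l with
  | nil => simp [pvAdj]
  | cons k t =>
    have hpk : ∀ x ∈ t, toLex k ≤ toLex x := (List.pairwise_cons.mp hp).1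
    have hpt : t.Pairwise (fun a b => toLex a ≤ toLex b) := (List.pairwise_cons.mp hp).2
    have ht := pvAdj_some_spec t k hpt hpk
    have hshape : pvAdj none (k :: t) = k :: pvAdj (some k) t := by
      simp only [pvAdj]
      rw [if_pos (by simp)]
    rw [hshape]
    constructor
    · rw [List.pairwise_cons]
      refine ⟨fun b hb => ?_, ht.1⟩
      have hb' := (ht.2 b).mp hb
      refine lt_of_le_of_ne (hpk b hb'.1) (fun e => hb'.2 ?_)
      exact (toLex.injective e).symm
    · intro x
      rw [List.mem_cons, ht.2 x, List.mem_cons]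
      constructor
      · rintro (rfl | ⟨hx, _⟩)
        · exact Or.inl rfl
        · exact Or.inr hx
      · rintro (rfl | hx)
        · exact Or.inl rfl
        · by_cases hxk : x = k
          · exact Or.inl hxk
          · exact Or.inr ⟨hx, hxk⟩

theorem pvFirst_spec (ks : List (String × String)) :
    ∀ (s : PySem.Set (String × String)),
    (pvFirst ks s).Nodup ∧ (∀ x, x ∈ pvFirst ks s ↔ x ∈ ks ∧ x ∉ s) := by
  induction ks with
  | nil => intro s; simp [pvFirst]
  | cons k t ih =>
    intro s
    by_cases hk : k ∈ s
    · have hc : PySem.Set.contains s k = true := (PySem.Set.contains_iff ..).mpr hk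
      have hs := ih s
      simp only [pvFirst, hc, if_true]
      refine ⟨hs.1, fun x => ?_⟩
      rw [hs.2 x, List.mem_cons]
      constructor
      · rintro ⟨hx, hns⟩; exact ⟨Or.inr hx, hns⟩
      · rintro ⟨(rfl | hx), hns⟩
        · exact absurd hk hns
        · exact ⟨hx, hns⟩
    · have hc : ¬ PySem.Set.contains s k = true := fun h => hk ((PySem.Set.contains_iff ..).mp h)
      have hs := ih (PySem.Set.add s k)
      simp only [pvFirst, hc, if_false, Bool.false_eq_true]
      constructor
      · rw [List.nodup_cons]
        refine ⟨fun h => ?_, hs.1⟩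
        exact ((hs.2 k).mp h).2 ((PySem.Set.mem_add ..).mpr (Or.inr rfl))
      · intro x
        rw [List.mem_cons, hs.2 x, List.mem_cons]
        constructor
        · rintro (rfl | ⟨hx, hna⟩)
          · exact ⟨Or.inl rfl, hk⟩
          · exact ⟨Or.inr hx, fun hxs => hna ((PySem.Set.mem_add ..).mpr (Or.inl hxs))⟩
        · rintro ⟨(rfl | hx), hns⟩
          · exact Or.inl rfl
          · by_cases hxk : x = k
            · exact Or.inl hxk
            · refine Or.inr ⟨hx, fun ha => ?_⟩
              rcases (PySem.Set.mem_add ..).mp ha with h | h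
              · exact hns h
              · exact hxk h

-- ===== VERDICT (by name: the statement is the Claim_ definition above) =====
theorem normalize_location_entries_py_spec : Claim_equal_normalize_location_entries_py := by
  intro payload _
  show normalize_location_entries_py payload = normalize_location_entries_py_alt payload
  simp only [normalize_location_entries_py, normalize_location_entries_py_alt]
  rw [pvA_fold payload [] PySem.Set.empty, pvB_fold1 payload [], pvB_fold2]
  simp only [List.nil_append]
  have hsp : (PySem.List.sorted (pvClean payload) (fun k => toLex k)).Pairwise (fun a b => toLex a ≤ toLex b) :=
    PySem.List.sorted_pairwise (pvClean payload) (fun k => toLex k)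
  have hadj := pvAdj_none_spec (PySem.List.sorted (pvClean payload) (fun k => toLex k)) hsp
  have hfst := pvFirst_spec (pvClean payload) PySem.Set.empty
  have hmem : ∀ x, x ∈ pvAdj none (PySem.List.sorted (pvClean payload) (fun k => toLex k))
      ↔ x ∈ pvFirst (pvClean payload) PySem.Set.empty := by
    intro x
    rw [hadj.2 x, PySem.List.mem_sorted, hfst.2 x]
    simp [PySem.Set.empty]
  have hnodupA : (pvAdj none (PySem.List.sorted (pvClean payload) (fun k => toLex k))).Nodup :=
    hadj.1.imp (fun h => by intro e; subst e; exact lt_irrefl _ h)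
  have hperm : (pvAdj none (PySem.List.sorted (pvClean payload) (fun k => toLex k))).Perm
      (pvFirst (pvClean payload) PySem.Set.empty) :=
    (List.perm_ext_iff_of_nodup hnodupA hfst.1).mpr hmem
  apply PySem.List.sorted_eq_of_perm_of_pairwise_lt
  · exact hperm.map _
  · rw [List.pairwise_map]
    refine hadj.1.imp ?_
    intro a b h
    simpa [pvKeyA_entry] using h
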